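-- pv_equiv track=rewrite | github.com/young31/Algorithm | kakao/2019-인턴/3.불량사용자.py | solution
-- ===== SOURCE A (Python) =====
-- from itertools import product
-- from itertools import product
--
-- def is_match(a, b):
--     if len(a) != len(b):
--         return False
--
--     for x, y in zip(a, b):
--         if y == '*':
--             continue
--         else:
--             if x == y:
--                 continue
--             else:
--                 return False
--     return True
--
-- def solution(user_id, banned_id):
--     possible = []
--     answer = 0
--     for b in banned_id:
--         tmp = []
--         for u in user_id:
--             if is_match(u, b):
--                 tmp.append(u)
--         possible.append(tmp)
--
--     res = []
--     for a in product(*possible):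
--         if len(a) == len(set(a)) and set(a) not in res:
--             answer += 1
--             res.append(set(a))
--
--     return answer
-- ===== SOURCE B (Python) =====
-- def is_match(a, b):
--     if len(a) != len(b):
--         return False
--     for x, y in zip(a, b):
--         if y == '*':
--             continue
--         else:
--             if x == y:
--                 continue
--             else:
--                 return False
--     return True
--
-- def solution(user_id, banned_id):
--     possible = [[u for u in user_id if is_match(u, b)] for b in banned_id]
--     result = []
--     def dfs(rest, used):
--         if not rest:
--             fs = set(used)
--             if not any(fs == r for r in result):
--                 result.append(fs)
--             return
--         for u in rest[0]:
--             if u not in used: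
--                 dfs(rest[1:], used + [u])
--     dfs(possible, [])
--     return len(result)
-- ===== Notes on version B (the rewrite author's own statement) =====
-- stated objective: faster
-- what changed: Replaced the itertools.product enumeration (generate every tuple of candidates, then discard tuples with repeated users and dedup by set) with recursive backtracking that skips already-used users while building the assignment, deduping complete assignments the same way.
import Mathlib
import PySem

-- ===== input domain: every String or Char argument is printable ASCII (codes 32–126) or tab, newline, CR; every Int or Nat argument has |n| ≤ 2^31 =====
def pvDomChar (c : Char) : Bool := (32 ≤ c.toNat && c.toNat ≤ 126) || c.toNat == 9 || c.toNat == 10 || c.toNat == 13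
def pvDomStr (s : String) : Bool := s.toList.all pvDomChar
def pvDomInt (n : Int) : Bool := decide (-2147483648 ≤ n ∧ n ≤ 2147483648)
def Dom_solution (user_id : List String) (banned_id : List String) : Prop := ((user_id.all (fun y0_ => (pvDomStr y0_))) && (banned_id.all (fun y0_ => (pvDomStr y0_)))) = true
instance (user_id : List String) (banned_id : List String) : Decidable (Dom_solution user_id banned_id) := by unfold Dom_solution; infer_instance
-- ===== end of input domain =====

-- B replaces A's itertools.product enumeration (generate every tuple, then filter out
-- tuples with repeats) by recursive backtracking that skips already-used users while
-- building the tuple (objective: faster — the invalid tuples are never generated).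

-- ===== PORT A =====
-- is_match: helper of both Pythons (Source B carries the same definition), ported step for step
def isMatchGo : List (Char × Char) → Bool
  | [] => true
  | (x, y) :: rest =>
      if y = '*' then isMatchGo rest
      else if x = y then isMatchGo rest
      else false

def isMatch (a b : String) : Bool :=
  if PySem.Str.len a ≠ PySem.Str.len b then false
  else isMatchGo (a.toList.zip b.toList)

-- itertools.product(*possible): ported by hand (no PySem primitive); exact — the
-- leftmost factor varies slowest, exactly itertools' order; tuples become lists
def pyProd : List (List String) → List (List String)
  | [] => [[]]
  | c :: cs =>
      let rest := pyProd cs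
      c.flatMap (fun u => rest.map (fun t => u :: t))

def solution (user_id : List String) (banned_id : List String) : Int :=
  let possible := banned_id.foldl (fun possible b =>
    possible ++ [user_id.foldl (fun tmp u => if isMatch u b then tmp ++ [u] else tmp) []]) []
  -- 'set(a) not in res': Python list membership tests '==', which on sets is set equality
  let st := (pyProd possible).foldl (fun (st : Int × List (PySem.Set String)) a =>
      let sa := PySem.Set.ofList a
      if (a.length : Int) == PySem.Set.len sa && !(st.2.any (fun r => PySem.Set.equal r sa)) then
        (st.1 + 1, st.2 ++ [sa])
      else st) ((0 : Int), ([] : List (PySem.Set String)))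
  st.1

-- ===== PORT B =====
-- 'if not any(fs == r for r in result): result.append(fs)' — the dedup append of Source B;
-- set(used) is PySem.Set.ofList, 'fs == r' on Python sets is Set.equal (exact)
def addFs (result : List (PySem.Set String)) (used : List String) : List (PySem.Set String) :=
  let fs := PySem.Set.ofList used
  if result.any (fun r => PySem.Set.equal r fs) then result else result ++ [fs]

mutual
  -- Source B's recursive dfs; its inner 'for u in rest[0]' loop is dfsLoop
  def dfs : List (List String) → List String → List (PySem.Set String) → List (PySem.Set String)
    | [], used, result => addFs result used
    | first :: others, used, result => dfsLoop others first used result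
  termination_by rest _ _ => (rest.length, 0)

  def dfsLoop : List (List String) → List String → List String → List (PySem.Set String) → List (PySem.Set String)
    | _, [], _, result => result
    | others, u :: us, used, result =>
        dfsLoop others us used (if used.contains u then result else dfs others (used ++ [u]) result)
  termination_by others us _ _ => (others.length, us.length)
end

def solution_alt (user_id : List String) (banned_id : List String) : Int :=
  let possible := banned_id.map (fun b => user_id.filter (fun u => isMatch u b))
  let result := dfs possible [] []
  (result.length : Int)

-- ===== PRECONDITION & SPEC =====
def Spec_solution (user_id : List String) (banned_id : List String) (out : Int) : Prop := out = solution_alt user_id banned_id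
instance (user_id : List String) (banned_id : List String) (out : Int) : Decidable (Spec_solution user_id banned_id out) := by unfold Spec_solution; infer_instance

-- ===== CLAIM (what is proved, stated in full; the proofs are below) =====
def Claim_equal_solution : Prop := ∀ (user_id : List String) (banned_id : List String), Dom_solution user_id banned_id → Spec_solution user_id banned_id (solution user_id banned_id)

-- ===== LEMMAS AND PROOFS =====

-- A's counting step, named (definitionally equal to the lambda inside `solution`)
def stepA (st : Int × List (PySem.Set String)) (a : List String) : Int × List (PySem.Set String) :=
  if (a.length : Int) == PySem.Set.len (PySem.Set.ofList a)
      && !(st.2.any (fun r => PySem.Set.equal r (PySem.Set.ofList a))) then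
    (st.1 + 1, st.2 ++ [PySem.Set.ofList a])
  else st

-- the list of complete assignments dfs visits, in visit order
def leaves : List (List String) → List String → List (List String)
  | [], used => [used]
  | c :: cs, used => c.flatMap (fun u => if used.contains u then [] else leaves cs (used ++ [u]))

-- 'each element is new w.r.t. everything before it (and to used)'
def distinctOk : List String → List String → Bool
  | _, [] => true
  | used, u :: a => !used.contains u && distinctOk (used ++ [u]) a

theorem dfsLoop_eq (cs : List (List String))
    (ih : ∀ used result, dfs cs used result = (leaves cs used).foldl addFs result) :
    ∀ (c used : List String) (result : List (PySem.Set String)),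
      dfsLoop cs c used result
        = (c.flatMap (fun u => if used.contains u then [] else leaves cs (used ++ [u]))).foldl addFs result := by
  intro c
  induction c with
  | nil => intro used result; simp [dfsLoop]
  | cons u us ihc =>
      intro used result
      rw [dfsLoop, ihc]
      by_cases h : u ∈ used
      · simp [h]
      · simp [h, ih]

theorem dfs_eq : ∀ (rest : List (List String)) (used : List String) (result : List (PySem.Set String)),
    dfs rest used result = (leaves rest used).foldl addFs result := by
  intro rest
  induction rest with
  | nil => intro used result; simp [dfs, leaves]
  | cons c cs ih =>
      intro used result
      rw [dfs, dfsLoop_eq cs ih, leaves]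

theorem leaves_eq : ∀ (cs : List (List String)) (used : List String),
    leaves cs used = ((pyProd cs).filter (distinctOk used)).map (fun a => used ++ a) := by
  intro cs
  induction cs with
  | nil => intro used; simp [leaves, pyProd, distinctOk]
  | cons c cs ih =>
      intro used
      rw [leaves, pyProd]
      rw [List.filter_flatMap, List.map_flatMap]
      apply List.flatMap_congr
      intro u _
      by_cases h : u ∈ used
      · simp [h, distinctOk, List.filter_map, Function.comp_def]
      · simp [h, distinctOk, List.filter_map, Function.comp_def, ih, List.map_map]

theorem distinctOk_iff : ∀ (a used : List String),
    distinctOk used a = true ↔ a.Nodup ∧ ∀ x ∈ a, x ∉ used := by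
  intro a
  induction a with
  | nil => intro used; simp [distinctOk]
  | cons u as ih =>
      intro used
      rw [distinctOk]
      simp only [Bool.and_eq_true, Bool.not_eq_true', List.contains_eq_mem, decide_eq_false_iff_not, ih]
      constructor
      · rintro ⟨hu, hnd, hx⟩
        refine ⟨List.nodup_cons.mpr ⟨fun hm => ?_, hnd⟩, ?_⟩
        · exact (hx u hm) (by simp)
        · intro x hx'
          rcases List.mem_cons.mp hx' with rfl | hxm
          · exact hu
          · intro hmem; exact (hx x hxm) (by simp [hmem])
      · rintro ⟨hnd, hx⟩
        rcases List.nodup_cons.mp hnd with ⟨hu_as, hnd'⟩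
        refine ⟨hx u (by simp), hnd', ?_⟩
        intro x hxm
        simp only [List.mem_append, List.mem_singleton]
        rintro (hmem | rfl)
        · exact hx x (List.mem_cons_of_mem _ hxm) hmem
        · exact hu_as hxm

theorem foldl_add_length_le : ∀ (a : List String) (s : PySem.Set String),
    (a.foldl PySem.Set.add s).length ≤ s.length + a.length := by
  intro a
  induction a with
  | nil => intro s; simp
  | cons x as ih =>
      intro s
      rw [List.foldl_cons]
      refine le_trans (ih _) ?_
      unfold PySem.Set.add
      split
      · simp
      · simp
        omega

-- (foldl add s a).length reaches s.length + a.length exactly when a is duplicate-free and disjoint from s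
theorem foldl_add_length_eq : ∀ (a : List String) (s : PySem.Set String),
    (a.foldl PySem.Set.add s).length = s.length + a.length ↔ a.Nodup ∧ ∀ x ∈ a, x ∉ s := by
  intro a
  induction a with
  | nil => intro s; simp
  | cons x as ih =>
      intro s
      rw [List.foldl_cons]
      by_cases hx : x ∈ s
      · have hadd : PySem.Set.add s x = s := by
          unfold PySem.Set.add
          simp [PySem.Set.contains, hx]
        rw [hadd]
        have hle := foldl_add_length_le as s
        constructor
        · intro h; simp at h; omega
        · rintro ⟨_, hall⟩; exact absurd hx (hall x (by simp))
      · have hadd : PySem.Set.add s x = s ++ [x] := by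
          unfold PySem.Set.add
          simp [PySem.Set.contains, hx]
        rw [hadd]
        have h2 := ih (s ++ [x])
        simp only [List.length_append, List.length_cons, List.length_nil, List.mem_append,
          List.mem_singleton] at h2 ⊢
        constructor
        · intro h
          obtain ⟨hnd, hall⟩ := h2.mp (by omega)
          refine ⟨List.nodup_cons.mpr ⟨fun hm => ?_, hnd⟩, ?_⟩
          · exact (hall x hm) (Or.inr rfl)
          · intro y hy
            rcases List.mem_cons.mp hy with rfl | hym
            · exact hx
            · exact fun hmem => (hall y hym) (Or.inl hmem)
        · rintro ⟨hnd, hall⟩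
          rcases List.nodup_cons.mp hnd with ⟨hx_as, hnd'⟩
          have := h2.mpr ⟨hnd', ?_⟩
          · omega
          · intro y hy
            rintro (hmem | rfl)
            · exact (hall y (List.mem_cons_of_mem _ hy)) hmem
            · exact hx_as hy

-- A's duplicate test 'len(a) == len(set(a))' is exactly the backtracker's distinctness test
theorem lenOk_eq_distinctOk (a : List String) :
    ((a.length : Int) == PySem.Set.len (PySem.Set.ofList a)) = distinctOk [] a := by
  have h := foldl_add_length_eq a []
  simp only [List.length_nil, Nat.zero_add, List.not_mem_nil, not_false_iff, implies_true,
    and_true] at h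
  rw [Bool.eq_iff_iff, beq_iff_eq, distinctOk_iff]
  simp only [List.not_mem_nil, not_false_iff, implies_true, and_true]
  rw [← h, PySem.Set.ofList_eq_foldl, PySem.Set.len]
  constructor
  · intro he; exact_mod_cast he.symm
  · intro he; exact_mod_cast he.symm

-- a fold whose step ignores elements failing p folds over the p-filtered list
theorem foldl_filter_of_id {α β : Type} (p : α → Bool) (f : β → α → β) :
    ∀ (xs : List α) (i : β), (∀ st x, x ∈ xs → p x = false → f st x = st) →
      xs.foldl f i = (xs.filter p).foldl f i := by
  intro xs
  induction xs with
  | nil => intro i _; rfl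
  | cons x xs ih =>
      intro i h
      rw [List.foldl_cons, List.filter_cons]
      by_cases hp : p x = true
      · rw [if_pos hp, List.foldl_cons]
        exact ih _ (fun st y hy => h st y (List.mem_cons_of_mem x hy))
      · rw [if_neg hp, h i x List.mem_cons_self (Bool.eq_false_iff.mpr hp)]
        exact ih _ (fun st y hy => h st y (List.mem_cons_of_mem x hy))

-- A's counting fold, on a list of duplicate-free tuples, performs B's dedup fold and counts it
theorem countFold_eq : ∀ (L : List (List String)) (ans : Int) (res : List (PySem.Set String)),
    (∀ a ∈ L, ((a.length : Int) == PySem.Set.len (PySem.Set.ofList a)) = true) →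
    L.foldl stepA (ans, res)
      = (ans + (((L.foldl addFs res).length : Int) - (res.length : Int)), L.foldl addFs res) := by
  intro L
  induction L with
  | nil => intro ans res _; simp
  | cons a L ih =>
      intro ans res h
      have ha := h a List.mem_cons_self
      rw [List.foldl_cons, List.foldl_cons]
      by_cases hseen : (res.any (fun r => PySem.Set.equal r (PySem.Set.ofList a))) = true
      · have h1 : stepA (ans, res) a = (ans, res) := by
          unfold stepA; rw [ha, hseen]; simp
        have h2 : addFs res a = res := by
          simp only [addFs]; rw [hseen]; simp
        rw [h1, h2, ih ans res (fun b hb => h b (List.mem_cons_of_mem a hb))]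
      · have hseen' : (res.any (fun r => PySem.Set.equal r (PySem.Set.ofList a))) = false :=
          Bool.eq_false_iff.mpr hseen
        have h1 : stepA (ans, res) a = (ans + 1, res ++ [PySem.Set.ofList a]) := by
          unfold stepA; rw [ha, hseen']; simp
        have h2 : addFs res a = res ++ [PySem.Set.ofList a] := by
          simp only [addFs]; rw [hseen']; simp
        rw [h1, h2, ih (ans + 1) _ (fun b hb => h b (List.mem_cons_of_mem a hb))]
        rw [Prod.mk.injEq]
        refine ⟨?_, rfl⟩
        simp only [List.length_append, List.length_singleton]
        push_cast
        ring

-- the whole pipeline, for any candidate-list matrix P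
theorem key_eq : ∀ (P : List (List String)),
    ((pyProd P).foldl stepA ((0 : Int), ([] : List (PySem.Set String)))).1
      = ((dfs P [] []).length : Int) := by
  intro P
  have hskip : ∀ (st : Int × List (PySem.Set String)) a, a ∈ pyProd P →
      distinctOk [] a = false → stepA st a = st := by
    intro st a _ hfalse
    unfold stepA
    rw [lenOk_eq_distinctOk, hfalse]
    simp
  rw [foldl_filter_of_id (fun a => distinctOk [] a) stepA (pyProd P) _ hskip]
  have hall : ∀ a ∈ (pyProd P).filter (fun a => distinctOk [] a),
      ((a.length : Int) == PySem.Set.len (PySem.Set.ofList a)) = true := by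
    intro a hmem
    rw [lenOk_eq_distinctOk]
    exact (List.mem_filter.mp hmem).2
  rw [countFold_eq _ 0 [] hall]
  rw [dfs_eq, leaves_eq]
  simp

-- A builds `possible` by appending; B's comprehension is the same list
theorem possible_eq (user_id banned_id : List String) :
    (banned_id.foldl (fun possible b =>
        possible ++ [user_id.foldl (fun tmp u => if isMatch u b then tmp ++ [u] else tmp) []]) [])
      = banned_id.map (fun b => user_id.filter (fun u => isMatch u b)) := by
  have h1 : ∀ b : String,
      user_id.foldl (fun tmp u => if isMatch u b then tmp ++ [u] else tmp) []
        = user_id.filter (fun u => isMatch u b) := by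
    intro b
    have := PySem.List.foldl_append_if (fun u => isMatch u b) (fun u => u) user_id []
    simpa using this
  calc banned_id.foldl (fun possible b =>
        possible ++ [user_id.foldl (fun tmp u => if isMatch u b then tmp ++ [u] else tmp) []]) []
      = [] ++ banned_id.map (fun b =>
          user_id.foldl (fun tmp u => if isMatch u b then tmp ++ [u] else tmp) []) :=
        PySem.List.foldl_append_singleton_eq_map _ banned_id []
    _ = banned_id.map (fun b => user_id.filter (fun u => isMatch u b)) := by
        simp only [List.nil_append]
        exact List.map_congr_left (fun b _ => h1 b)

-- ===== VERDICT (by name: the statement is the Claim_ definition above) =====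
theorem solution_spec : Claim_equal_solution := by
  intro user_id banned_id _
  unfold Spec_solution
  show ((pyProd (banned_id.foldl (fun possible b =>
      possible ++ [user_id.foldl (fun tmp u => if isMatch u b then tmp ++ [u] else tmp) []]) [])).foldl
        stepA ((0 : Int), ([] : List (PySem.Set String)))).1
    = ((dfs (banned_id.map (fun b => user_id.filter (fun u => isMatch u b))) [] []).length : Int)
  rw [possible_eq]
  exact key_eq _
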